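-- pv_equiv track=rewrite | github.com/laurabuilds7/calmlybloom-site | research/research.py | vibe_fit
-- ===== SOURCE A (Python) =====
-- def vibe_fit(domain):
--     base = domain.rsplit(".", 1)[0]
--     tld = domain.rsplit(".", 1)[1]
--     if tld == "garden":
--         return "botanical"
--     if tld == "club":
--         return "members-club"
--     if tld == "boutique":
--         return "boutique"
--     if any(w in base for w in ["bloom", "blossom", "petal", "fleur", "flora", "rose",
--                                  "lilac", "wisteria", "primrose", "magnolia", "camellia",
--                                  "peony", "freesia", "dahlia", "mimosa", "verbena",
--                                  "dandelion", "lavender", "jasmine", "marigold", "iris",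
--                                  "cornflower", "bluebell", "orchid", "violet", "crocus",
--                                  "gardenia", "hydrangea", "lilac", "poppy"]):
--         return "botanical"
--     if any(w in base for w in ["dawn", "dusk", "aurora", "glow", "light", "luminous",
--                                  "lumen", "sunrose", "gloaming", "goldenhour", "firstlight",
--                                  "amber", "sun", "moonflower"]):
--         return "dawn-light"
--     if any(w in base for w in ["slow", "soft", "gentle", "ease", "quiet", "lush",
--                                  "saunter", "unhurried", "linen", "still", "calm", "tend"]):
--         return "slow-living"
--     if any(w in base for w in ["meadowlark", "lark", "nightingale", "warbler", "goldfinch",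
--                                  "sparrow", "swallow", "fledg", "songbird", "firefly",
--                                  "silkmoth", "lunamoth", "wren"]):
--         return "bird"
--     if any(w in base for w in ["brook", "creek", "tide", "current", "cove", "flow",
--                                  "stillwater", "rivulet", "shoal", "marsh"]):
--         return "water"
--     return "invented-feminine"
-- ===== SOURCE B (Python) =====
-- # Single position-major scan: instead of staged per-category any-substring checks,
-- # walk every starting position of base once and keep the minimum category priority
-- # whose keyword begins there; the minimum priority equals A's first-match category.
-- _TLD = {"garden": "botanical", "club": "members-club", "boutique": "boutique"}
--
-- _CATS = ["botanical", "dawn-light", "slow-living", "bird", "water"]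
--
-- _KW = [(w, p) for p, ws in enumerate([
--     ["bloom", "blossom", "petal", "fleur", "flora", "rose",
--      "lilac", "wisteria", "primrose", "magnolia", "camellia",
--      "peony", "freesia", "dahlia", "mimosa", "verbena",
--      "dandelion", "lavender", "jasmine", "marigold", "iris",
--      "cornflower", "bluebell", "orchid", "violet", "crocus",
--      "gardenia", "hydrangea", "lilac", "poppy"],
--     ["dawn", "dusk", "aurora", "glow", "light", "luminous",
--      "lumen", "sunrose", "gloaming", "goldenhour", "firstlight",
--      "amber", "sun", "moonflower"],
--     ["slow", "soft", "gentle", "ease", "quiet", "lush",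
--      "saunter", "unhurried", "linen", "still", "calm", "tend"],
--     ["meadowlark", "lark", "nightingale", "warbler", "goldfinch",
--      "sparrow", "swallow", "fledg", "songbird", "firefly",
--      "silkmoth", "lunamoth", "wren"],
--     ["brook", "creek", "tide", "current", "cove", "flow",
--      "stillwater", "rivulet", "shoal", "marsh"]]) for w in ws]
--
--
-- def vibe_fit(domain):
--     base, tld = domain.rsplit(".", 1)
--     cat = _TLD.get(tld)
--     if cat is not None:
--         return cat
--     best = len(_CATS)
--     for i in range(len(base)):
--         for w, p in _KW:
--             if p < best and base[i:].startswith(w):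
--                 best = p
--     return _CATS[best] if best < len(_CATS) else "invented-feminine"
-- ===== Notes on version B (the rewrite author's own statement) =====
-- stated objective: alternative
-- what changed: Instead of A's staged category-by-category any-substring checks, B makes one position-major scan of base: for every starting position it tests which keyword begins there and keeps the minimum category priority seen, then maps that minimum to the category (TLD rules become a dict lookup); first-match tie-breaking is recovered because A's chain order equals the priority minimum.
import Mathlib
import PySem

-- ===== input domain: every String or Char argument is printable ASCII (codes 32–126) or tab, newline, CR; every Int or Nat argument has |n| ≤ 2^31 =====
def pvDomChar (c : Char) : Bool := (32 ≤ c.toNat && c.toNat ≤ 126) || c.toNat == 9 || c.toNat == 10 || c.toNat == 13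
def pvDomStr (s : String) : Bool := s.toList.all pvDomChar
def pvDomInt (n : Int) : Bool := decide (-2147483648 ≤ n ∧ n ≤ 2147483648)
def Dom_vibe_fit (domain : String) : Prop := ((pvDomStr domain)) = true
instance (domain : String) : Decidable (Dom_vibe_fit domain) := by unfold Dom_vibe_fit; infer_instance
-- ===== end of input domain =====

-- B replaces A's staged category-by-category any-substring checks with ONE position-major
-- scan of base keeping the minimum matched category priority ('alternative' objective, same cost).
-- The keyword lists are shared named constants (byte-for-byte the lists both Pythons carry).

def wordsBotanical : List String :=
  ["bloom", "blossom", "petal", "fleur", "flora", "rose",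
   "lilac", "wisteria", "primrose", "magnolia", "camellia",
   "peony", "freesia", "dahlia", "mimosa", "verbena",
   "dandelion", "lavender", "jasmine", "marigold", "iris",
   "cornflower", "bluebell", "orchid", "violet", "crocus",
   "gardenia", "hydrangea", "lilac", "poppy"]
def wordsDawn : List String :=
  ["dawn", "dusk", "aurora", "glow", "light", "luminous",
   "lumen", "sunrose", "gloaming", "goldenhour", "firstlight",
   "amber", "sun", "moonflower"]
def wordsSlow : List String :=
  ["slow", "soft", "gentle", "ease", "quiet", "lush",
   "saunter", "unhurried", "linen", "still", "calm", "tend"]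
def wordsBird : List String :=
  ["meadowlark", "lark", "nightingale", "warbler", "goldfinch",
   "sparrow", "swallow", "fledg", "songbird", "firefly",
   "silkmoth", "lunamoth", "wren"]
def wordsWater : List String :=
  ["brook", "creek", "tide", "current", "cove", "flow",
   "stillwater", "rivulet", "shoal", "marsh"]

-- ===== PORT A =====
-- s.rsplit(".", 1): split at the LAST "." (exact: rfind locates the last occurrence; no "." gives the one-element list)
def pyRsplitDot1 (s : String) : List String :=
  let r := PySem.Str.rfind s "."
  if r = -1 then [s]
  else [String.ofList (s.toList.take r.toNat), String.ofList (s.toList.drop (r.toNat + 1))]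

def vibe_fit (domain : String) : String :=
  let base := PySem.List.pyGetD (pyRsplitDot1 domain) 0 ""   -- domain.rsplit(".",1)[0]
  let tld  := PySem.List.pyGetD (pyRsplitDot1 domain) 1 ""   -- domain.rsplit(".",1)[1]; in range under Pre_
  if tld = "garden" then "botanical"
  else if tld = "club" then "members-club"
  else if tld = "boutique" then "boutique"
  else if wordsBotanical.any (fun w => PySem.Str.isIn w base) then "botanical"
  else if wordsDawn.any (fun w => PySem.Str.isIn w base) then "dawn-light"
  else if wordsSlow.any (fun w => PySem.Str.isIn w base) then "slow-living"
  else if wordsBird.any (fun w => PySem.Str.isIn w base) then "bird"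
  else if wordsWater.any (fun w => PySem.Str.isIn w base) then "water"
  else "invented-feminine"

-- ===== PORT B =====
def tldRules : PySem.Dict String String :=
  PySem.Dict.mk [("garden", "botanical"), ("club", "members-club"), ("boutique", "boutique")]

def catsList : List String := ["botanical", "dawn-light", "slow-living", "bird", "water"]

-- the flattened (keyword, priority) table _KW: [(w, p) for p, ws in enumerate([...]) for w in ws]
def kwList : List (String × Nat) :=
  wordsBotanical.map (fun w => (w, 0)) ++ wordsDawn.map (fun w => (w, 1)) ++
  wordsSlow.map (fun w => (w, 2)) ++ wordsBird.map (fun w => (w, 3)) ++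
  wordsWater.map (fun w => (w, 4))

-- best = 5; for i in range(len(base)): for w, p in _KW: if p < best and base[i:].startswith(w): best = p
-- base[i:].startswith(w) with i ≥ 0 is exactly startswith on drop i
def scanBest (base : String) : Nat :=
  (List.range base.toList.length).foldl (fun b i =>
    kwList.foldl (fun b wp =>
      if wp.2 < b ∧ PySem.Chars.startswith (base.toList.drop i) wp.1.toList = true
      then wp.2 else b) b) catsList.length

def vibe_fit_alt (domain : String) : String :=
  match pyRsplitDot1 domain with          -- base, tld = domain.rsplit(".", 1)
  | [base, tld] =>
      (match PySem.Dict.get? tldRules tld with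
       | some cat => cat
       | none =>
          if scanBest base < catsList.length then catsList.getD (scanBest base) ""
          else "invented-feminine")
  | _ => ""   -- Python raises ValueError (unpacking) here: no "." in domain; outside Pre_

-- ===== PRECONDITION & SPEC =====
-- Pre_ excludes exactly the domains with no ".", on which A's '[1]' raises IndexError (and B's unpacking raises ValueError).
def Pre_vibe_fit (domain : String) : Prop := PySem.Str.isIn "." domain = true
instance (domain : String) : Decidable (Pre_vibe_fit domain) := by unfold Pre_vibe_fit; infer_instance
def pvWitness_vibe_fit : String := "calmlybloom.com"

def Spec_vibe_fit (domain : String) (out : String) : Prop := out = vibe_fit_alt domain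
instance (domain : String) (out : String) : Decidable (Spec_vibe_fit domain out) := by unfold Spec_vibe_fit; infer_instance

-- ===== CLAIM (what is proved, stated in full; the proofs are below) =====
def Claim_equal_vibe_fit : Prop := ∀ (domain : String), Dom_vibe_fit domain → Pre_vibe_fit domain → Spec_vibe_fit domain (vibe_fit domain)

-- ===== LEMMAS AND PROOFS =====

-- If sub occurs in s at some position, the descending scan of rfind.go never returns -1.
theorem rfind_go_ne_neg_one (s sub : List Char) (n j : Nat) (hj : j ≤ n)
    (hp : sub.isPrefixOf (s.drop j) = true) : PySem.Chars.rfind.go s sub n ≠ -1 := by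
  induction n with
  | zero =>
      interval_cases j
      simp only [PySem.Chars.rfind.go]
      simp_all
  | succ m ih =>
      simp only [PySem.Chars.rfind.go]
      by_cases h : sub.isPrefixOf (List.drop (m + 1) s) = true
      · simp [h]
        omega
      · simp only [h, Bool.false_eq_true, ite_false]
        rcases Nat.lt_or_ge j (m + 1) with hlt | hge
        · exact ih (Nat.lt_succ_iff.mp hlt)
        · have hje : j = m + 1 := by omega
          subst hje
          exact absurd hp h

theorem rfind_ne_neg_one_of_isIn (sub s : String) (h : PySem.Str.isIn sub s = true) :
    PySem.Str.rfind s sub ≠ -1 := by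
  rw [PySem.Str.rfind_eq]
  rw [PySem.Str.isIn_iff_infix] at h
  obtain ⟨p, q, hpq⟩ := h
  have hp : sub.toList.isPrefixOf (s.toList.drop p.length) = true := by
    rw [← hpq]
    simp [List.isPrefixOf_iff_prefix]
  have hlen : p.length ≤ s.toList.length := by
    rw [← hpq]; simp
  exact rfind_go_ne_neg_one s.toList sub.toList s.toList.length p.length hlen hp

-- the guarded-update fold is a min-fold over the matching priorities
theorem foldl_ite_min (L : List (String × Nat)) (c : String × Nat → Bool) (b : Nat) :
    L.foldl (fun b wp => if wp.2 < b ∧ c wp = true then wp.2 else b) b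
      = (L.filterMap (fun wp => if c wp then some wp.2 else none)).foldl min b := by
  induction L generalizing b with
  | nil => rfl
  | cons hd tl ih =>
      by_cases h : c hd = true
      · have hmin : (if hd.2 < b ∧ True then hd.2 else b) = min b hd.2 := by
          simp only [and_true, Nat.min_def]
          split_ifs <;> omega
        simp only [List.foldl_cons, List.filterMap_cons, h, if_true]
        rw [hmin]
        exact ih (min b hd.2)
      · have hcf : c hd = false := by revert h; cases c hd <;> simp
        simp only [List.foldl_cons, List.filterMap_cons, hcf, Bool.false_eq_true, and_false,
          if_false]
        exact ih b

-- nesting min-folds is a min-fold over the flattened list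
theorem foldl_min_flatMap (L : List Nat) (m : Nat → List Nat) (b : Nat) :
    L.foldl (fun b i => (m i).foldl min b) b = (L.flatMap m).foldl min b := by
  induction L generalizing b with
  | nil => rfl
  | cons hd tl ih => simp [List.flatMap_cons, List.foldl_append, ih]

theorem foldl_min_le_init (l : List Nat) (b : Nat) : l.foldl min b ≤ b := by
  induction l generalizing b with
  | nil => exact Nat.le_refl b
  | cons hd tl ih => exact le_trans (ih _) (min_le_left _ _)

theorem foldl_min_le_mem (l : List Nat) (b : Nat) (x : Nat) (hx : x ∈ l) : l.foldl min b ≤ x := by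
  induction l generalizing b with
  | nil => cases hx
  | cons hd tl ih =>
      rcases List.mem_cons.mp hx with h | h
      · subst h
        simp only [List.foldl_cons]
        exact le_trans (foldl_min_le_init tl _) (min_le_right _ _)
      · simp only [List.foldl_cons]
        exact ih _ h

theorem foldl_min_eq_or_mem (l : List Nat) (b : Nat) : l.foldl min b = b ∨ l.foldl min b ∈ l := by
  induction l generalizing b with
  | nil => left; rfl
  | cons hd tl ih =>
      rcases ih (min b hd) with h | h
      · rw [List.foldl_cons, h]
        rcases Nat.lt_or_ge hd b with hlt | hge
        · right; simp [min_eq_right (le_of_lt hlt)]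
        · left; simp [min_eq_left hge]
      · right
        rw [List.foldl_cons]
        exact List.mem_cons_of_mem _ h

-- every keyword is nonempty
theorem kw_nonempty : ∀ wp ∈ kwList, wp.1.toList ≠ [] := by decide

-- membership in the flattened match list ↔ some keyword of that priority is a substring of base
theorem mem_big_iff (base : List Char) (p : Nat) :
    (p ∈ (List.range base.length).flatMap (fun i =>
        kwList.filterMap (fun wp =>
          if PySem.Chars.startswith (base.drop i) wp.1.toList then some wp.2 else none)))
      ↔ ∃ w, (w, p) ∈ kwList ∧ PySem.Chars.isIn w.toList base = true := by
  simp only [List.mem_flatMap, List.mem_range, List.mem_filterMap]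
  constructor
  · rintro ⟨i, hi, ⟨w, q⟩, hmem, hif⟩
    by_cases hs : PySem.Chars.startswith (base.drop i) w.toList = true
    · simp only [hs, if_true, Option.some.injEq] at hif
      subst hif
      refine ⟨w, hmem, ?_⟩
      rw [← PySem.Chars.exists_prefix_drop_iff_isIn]
      exact ⟨i, (PySem.Chars.startswith_iff _ _).mp hs⟩
    · simp [hs] at hif
  · rintro ⟨w, hmem, hin⟩
    rw [← PySem.Chars.exists_prefix_drop_iff_isIn] at hin
    obtain ⟨j, hj⟩ := hin
    have hne : w.toList ≠ [] := kw_nonempty (w, p) hmem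
    have hjlt : j < base.length := by
      by_contra hge
      have hd : base.drop j = [] := List.drop_eq_nil_of_le (by omega)
      rw [hd] at hj
      exact hne (List.prefix_nil.mp hj)
    have hs : PySem.Chars.startswith (base.drop j) w.toList = true :=
      (PySem.Chars.startswith_iff _ _).mpr hj
    exact ⟨j, hjlt, (w, p), hmem, by simp [hs]⟩

-- "some keyword of priority p is in base" spelt per category
theorem exists_kw_iff (base : String) (p : Nat) :
    (∃ w, (w, p) ∈ kwList ∧ PySem.Chars.isIn w.toList base.toList = true) ↔
      ((p = 0 ∧ wordsBotanical.any (fun w => PySem.Str.isIn w base) = true) ∨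
       (p = 1 ∧ wordsDawn.any (fun w => PySem.Str.isIn w base) = true) ∨
       (p = 2 ∧ wordsSlow.any (fun w => PySem.Str.isIn w base) = true) ∨
       (p = 3 ∧ wordsBird.any (fun w => PySem.Str.isIn w base) = true) ∨
       (p = 4 ∧ wordsWater.any (fun w => PySem.Str.isIn w base) = true)) := by
  simp only [kwList, List.mem_append, List.mem_map, List.any_eq_true, PySem.Str.isIn,
    Prod.mk.injEq]
  constructor
  · rintro ⟨w, hmem, hin⟩
    rcases hmem with
        ((((⟨a, ha, he, hp⟩ | ⟨a, ha, he, hp⟩) | ⟨a, ha, he, hp⟩) | ⟨a, ha, he, hp⟩) | ⟨a, ha, he, hp⟩) <;>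
      subst he <;> subst hp <;>
      [exact Or.inl ⟨rfl, ⟨_, ha, hin⟩⟩;
       exact Or.inr (Or.inl ⟨rfl, ⟨_, ha, hin⟩⟩);
       exact Or.inr (Or.inr (Or.inl ⟨rfl, ⟨_, ha, hin⟩⟩));
       exact Or.inr (Or.inr (Or.inr (Or.inl ⟨rfl, ⟨_, ha, hin⟩⟩)));
       exact Or.inr (Or.inr (Or.inr (Or.inr ⟨rfl, ⟨_, ha, hin⟩⟩)))]
  · rintro (⟨rfl, x, hx, hin⟩ | ⟨rfl, x, hx, hin⟩ | ⟨rfl, x, hx, hin⟩ | ⟨rfl, x, hx, hin⟩ | ⟨rfl, x, hx, hin⟩) <;>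
      [exact ⟨x, Or.inl (Or.inl (Or.inl (Or.inl ⟨x, hx, rfl, rfl⟩))), hin⟩;
       exact ⟨x, Or.inl (Or.inl (Or.inl (Or.inr ⟨x, hx, rfl, rfl⟩))), hin⟩;
       exact ⟨x, Or.inl (Or.inl (Or.inr ⟨x, hx, rfl, rfl⟩)), hin⟩;
       exact ⟨x, Or.inl (Or.inr ⟨x, hx, rfl, rfl⟩), hin⟩;
       exact ⟨x, Or.inr ⟨x, hx, rfl, rfl⟩, hin⟩]

-- the scan computes the min-fold over the flattened match list
theorem scanBest_eq_foldl_min (base : String) :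
    scanBest base = ((List.range base.toList.length).flatMap (fun i =>
        kwList.filterMap (fun wp =>
          if PySem.Chars.startswith (base.toList.drop i) wp.1.toList then some wp.2 else none))).foldl
        min catsList.length := by
  unfold scanBest
  rw [← foldl_min_flatMap]
  have hfun : (fun (b : Nat) (i : Nat) =>
      kwList.foldl (fun b wp =>
        if wp.2 < b ∧ PySem.Chars.startswith (base.toList.drop i) wp.1.toList = true
        then wp.2 else b) b)
    = (fun (b : Nat) (i : Nat) =>
      (kwList.filterMap (fun wp =>
        if PySem.Chars.startswith (base.toList.drop i) wp.1.toList then some wp.2 else none)).foldl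
        min b) := by
    funext b i
    exact foldl_ite_min kwList (fun wp => PySem.Chars.startswith (base.toList.drop i) wp.1.toList) b
  rw [hfun]

-- the classification computed by the two ports agrees for any base/tld pair
theorem classify_eq (base tld : String) :
    (if tld = "garden" then "botanical"
     else if tld = "club" then "members-club"
     else if tld = "boutique" then "boutique"
     else if wordsBotanical.any (fun w => PySem.Str.isIn w base) then "botanical"
     else if wordsDawn.any (fun w => PySem.Str.isIn w base) then "dawn-light"
     else if wordsSlow.any (fun w => PySem.Str.isIn w base) then "slow-living"
     else if wordsBird.any (fun w => PySem.Str.isIn w base) then "bird"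
     else if wordsWater.any (fun w => PySem.Str.isIn w base) then "water"
     else "invented-feminine") =
    (match PySem.Dict.get? tldRules tld with
     | some cat => cat
     | none =>
        if scanBest base < catsList.length then catsList.getD (scanBest base) ""
        else "invented-feminine") := by
  by_cases hg : tld = "garden"
  · subst hg; simp [tldRules, PySem.Dict.get?]
  by_cases hc : tld = "club"
  · subst hc; simp [tldRules, PySem.Dict.get?]
  by_cases hb : tld = "boutique"
  · subst hb; simp [tldRules, PySem.Dict.get?]
  have hg' : ("garden" == tld) = false := by simp; exact fun h => hg h.symm
  have hc' : ("club" == tld) = false := by simp; exact fun h => hc h.symm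
  have hb' : ("boutique" == tld) = false := by simp; exact fun h => hb h.symm
  have hnone : PySem.Dict.get? tldRules tld = none := by
    simp [tldRules, PySem.Dict.get?, hg', hc', hb']
  rw [hnone]
  simp only [hg, hc, hb, ite_false]
  -- characterise r := scanBest base as the first-matching priority
  have hmemiff : ∀ p, (p ∈ (List.range base.toList.length).flatMap (fun i =>
      kwList.filterMap (fun wp =>
        if PySem.Chars.startswith (base.toList.drop i) wp.1.toList then some wp.2 else none)))
      ↔ ((p = 0 ∧ wordsBotanical.any (fun w => PySem.Str.isIn w base) = true) ∨
         (p = 1 ∧ wordsDawn.any (fun w => PySem.Str.isIn w base) = true) ∨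
         (p = 2 ∧ wordsSlow.any (fun w => PySem.Str.isIn w base) = true) ∨
         (p = 3 ∧ wordsBird.any (fun w => PySem.Str.isIn w base) = true) ∨
         (p = 4 ∧ wordsWater.any (fun w => PySem.Str.isIn w base) = true)) :=
    fun p => (mem_big_iff base.toList p).trans (exists_kw_iff base p)
  have hself : scanBest base = catsList.length ∨
      ((scanBest base = 0 ∧ wordsBotanical.any (fun w => PySem.Str.isIn w base) = true) ∨
       (scanBest base = 1 ∧ wordsDawn.any (fun w => PySem.Str.isIn w base) = true) ∨
       (scanBest base = 2 ∧ wordsSlow.any (fun w => PySem.Str.isIn w base) = true) ∨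
       (scanBest base = 3 ∧ wordsBird.any (fun w => PySem.Str.isIn w base) = true) ∨
       (scanBest base = 4 ∧ wordsWater.any (fun w => PySem.Str.isIn w base) = true)) := by
    rw [scanBest_eq_foldl_min]
    rcases foldl_min_eq_or_mem _ catsList.length with h | h
    · exact Or.inl h
    · exact Or.inr ((hmemiff _).mp h)
  have hle : ∀ p, ((p = 0 ∧ wordsBotanical.any (fun w => PySem.Str.isIn w base) = true) ∨
       (p = 1 ∧ wordsDawn.any (fun w => PySem.Str.isIn w base) = true) ∨
       (p = 2 ∧ wordsSlow.any (fun w => PySem.Str.isIn w base) = true) ∨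
       (p = 3 ∧ wordsBird.any (fun w => PySem.Str.isIn w base) = true) ∨
       (p = 4 ∧ wordsWater.any (fun w => PySem.Str.isIn w base) = true)) →
      scanBest base ≤ p := by
    intro p hp
    rw [scanBest_eq_foldl_min]
    exact foldl_min_le_mem _ _ _ ((hmemiff p).mpr hp)
  by_cases h0 : wordsBotanical.any (fun w => PySem.Str.isIn w base) = true
  · have hr : scanBest base = 0 := Nat.le_zero.mp (hle 0 (Or.inl ⟨rfl, h0⟩))
    rw [if_pos h0, hr]
    rfl
  by_cases h1 : wordsDawn.any (fun w => PySem.Str.isIn w base) = true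
  · have hub : scanBest base ≤ 1 := hle 1 (Or.inr (Or.inl ⟨rfl, h1⟩))
    have hr : scanBest base = 1 := by
      rcases hself with h | h
      · simp [catsList] at h; omega
      · rcases h with ⟨he, hw⟩ | ⟨he, _⟩ | ⟨he, _⟩ | ⟨he, _⟩ | ⟨he, _⟩ <;> first
          | (exact absurd hw h0) | omega
    rw [if_neg h0, if_pos h1, hr]
    rfl
  by_cases h2 : wordsSlow.any (fun w => PySem.Str.isIn w base) = true
  · have hub : scanBest base ≤ 2 := hle 2 (Or.inr (Or.inr (Or.inl ⟨rfl, h2⟩)))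
    have hr : scanBest base = 2 := by
      rcases hself with h | h
      · simp [catsList] at h; omega
      · rcases h with ⟨he, hw⟩ | ⟨he, hw⟩ | ⟨he, _⟩ | ⟨he, _⟩ | ⟨he, _⟩ <;> first
          | (exact absurd hw h0) | (exact absurd hw h1) | omega
    rw [if_neg h0, if_neg h1, if_pos h2, hr]
    rfl
  by_cases h3 : wordsBird.any (fun w => PySem.Str.isIn w base) = true
  · have hub : scanBest base ≤ 3 := hle 3 (Or.inr (Or.inr (Or.inr (Or.inl ⟨rfl, h3⟩))))
    have hr : scanBest base = 3 := by
      rcases hself with h | h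
      · simp [catsList] at h; omega
      · rcases h with ⟨he, hw⟩ | ⟨he, hw⟩ | ⟨he, hw⟩ | ⟨he, _⟩ | ⟨he, _⟩ <;> first
          | (exact absurd hw h0) | (exact absurd hw h1) | (exact absurd hw h2) | omega
    rw [if_neg h0, if_neg h1, if_neg h2, if_pos h3, hr]
    rfl
  by_cases h4 : wordsWater.any (fun w => PySem.Str.isIn w base) = true
  · have hub : scanBest base ≤ 4 := hle 4 (Or.inr (Or.inr (Or.inr (Or.inr ⟨rfl, h4⟩))))
    have hr : scanBest base = 4 := by
      rcases hself with h | h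
      · simp [catsList] at h; omega
      · rcases h with ⟨he, hw⟩ | ⟨he, hw⟩ | ⟨he, hw⟩ | ⟨he, hw⟩ | ⟨he, _⟩ <;> first
          | (exact absurd hw h0) | (exact absurd hw h1) | (exact absurd hw h2)
          | (exact absurd hw h3) | omega
    rw [if_neg h0, if_neg h1, if_neg h2, if_neg h3, if_pos h4, hr]
    rfl
  · have hr : scanBest base = catsList.length := by
      rcases hself with h | h
      · exact h
      · rcases h with ⟨_, hw⟩ | ⟨_, hw⟩ | ⟨_, hw⟩ | ⟨_, hw⟩ | ⟨_, hw⟩ <;> first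
          | (exact absurd hw h0) | (exact absurd hw h1) | (exact absurd hw h2)
          | (exact absurd hw h3) | (exact absurd hw h4)
    rw [if_neg h0, if_neg h1, if_neg h2, if_neg h3, if_neg h4, hr]
    rfl

-- ===== VERDICT (by name: the statement is the Claim_ definition above) =====
theorem vibe_fit_spec : Claim_equal_vibe_fit := by
  intro domain _ hpre
  have hr : PySem.Str.rfind domain "." ≠ -1 := rfind_ne_neg_one_of_isIn "." domain hpre
  unfold Spec_vibe_fit vibe_fit vibe_fit_alt pyRsplitDot1
  simp only [hr, ite_false]
  exact classify_eq _ _
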